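-- pv_equiv track=rewrite | github.com/Silence250/japan_study | parser.py | _sanitize_choices
-- ===== SOURCE A (Python) =====
-- from typing import Any, Dict, List, Optional, Tuple
--
-- def _sanitize_choices(choices: List[str], answer_index: int) -> Tuple[List[str], int]:
--     cleaned: List[str] = []
--     new_answer_index: Optional[int] = None
--     for idx, choice in enumerate(choices):
--         trimmed = choice.strip()
--         if not trimmed:
--             continue
--         if idx == answer_index:
--             new_answer_index = len(cleaned)
--         cleaned.append(trimmed)
--     if new_answer_index is None:
--         return cleaned, -1
--     return cleaned, new_answer_index
-- ===== SOURCE B (Python) =====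
-- def _sanitize_choices(choices, answer_index):
--     cleaned = [c.strip() for c in choices if c.strip()]
--     if 0 <= answer_index < len(choices) and choices[answer_index].strip():
--         new_index = sum(1 for c in choices[:answer_index] if c.strip())
--     else:
--         new_index = -1
--     return cleaned, new_index
-- ===== Notes on version B (the rewrite author's own statement) =====
-- stated objective: simpler
-- what changed: Replaces A's single fused loop that threads (cleaned, new_answer_index) state through enumerate with two independent passes: a filter-and-strip comprehension for the cleaned list, plus a separate bounds-and-nonempty check with a count of kept choices before the answer index.
import Mathlib
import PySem

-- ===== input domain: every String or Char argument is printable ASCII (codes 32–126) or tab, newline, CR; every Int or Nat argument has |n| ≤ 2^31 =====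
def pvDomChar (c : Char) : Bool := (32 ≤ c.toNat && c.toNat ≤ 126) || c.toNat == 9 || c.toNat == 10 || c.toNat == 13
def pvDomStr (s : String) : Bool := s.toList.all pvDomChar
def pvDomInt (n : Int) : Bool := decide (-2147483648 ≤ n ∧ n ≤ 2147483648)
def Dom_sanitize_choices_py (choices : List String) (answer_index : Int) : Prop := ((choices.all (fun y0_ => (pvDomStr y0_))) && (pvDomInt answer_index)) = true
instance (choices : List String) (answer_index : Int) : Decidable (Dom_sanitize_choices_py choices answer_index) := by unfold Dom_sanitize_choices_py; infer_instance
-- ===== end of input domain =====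

-- B: two independent passes (filter-and-strip comprehension, then count of kept items before the answer) instead of A's single fused loop; objective: simpler.


-- ===== PORT A =====
def sanitize_choices_py (choices : List String) (answer_index : Int) : List String × Int :=
  let st := (PySem.List.enumerate choices).foldl
    (fun (st : List String × Option Int) (p : Int × String) =>
      let trimmed := PySem.Str.strip p.2
      if trimmed == "" then st
      else
        let na := if p.1 == answer_index then some ((st.1.length : Int)) else st.2
        (st.1 ++ [trimmed], na)) ([], none)
  match st.2 with
  | none => (st.1, -1)
  | some i => (st.1, i)

-- ===== PORT B =====
def sanitize_choices_py_alt (choices : List String) (answer_index : Int) : List String × Int :=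
  let cleaned := (choices.filter (fun c => PySem.Str.strip c != "")).map PySem.Str.strip
  let new_index : Int :=
    if (decide (0 ≤ answer_index) && decide (answer_index < (choices.length : Int))
        && (match PySem.List.pyGet? choices answer_index with
            | some c => PySem.Str.strip c != ""
            | none => false)) then
      ((PySem.List.slice choices none (some answer_index)).countP
        (fun c => PySem.Str.strip c != "") : Int)
    else -1
  (cleaned, new_index)

-- ===== PRECONDITION & SPEC =====
def Spec_sanitize_choices_py (choices : List String) (answer_index : Int) (out : List String × Int) : Prop := out = sanitize_choices_py_alt choices answer_index
instance (choices : List String) (answer_index : Int) (out : List String × Int) : Decidable (Spec_sanitize_choices_py choices answer_index out) := by unfold Spec_sanitize_choices_py; infer_instance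

-- ===== CLAIM (what is proved, stated in full; the proofs are below) =====
def Claim_equal_sanitize_choices_py : Prop := ∀ (choices : List String) (answer_index : Int), Dom_sanitize_choices_py choices answer_index → Spec_sanitize_choices_py choices answer_index (sanitize_choices_py choices answer_index)

-- ===== LEMMAS AND PROOFS =====

-- Invariant of A's fused loop, over any enumerate start s and any accumulator (acc, opt).
theorem sanA_loop (ai : Int) (cs : List String) (s : Int) (acc : List String) (opt : Option Int) :
    (PySem.List.enumerate cs s).foldl
      (fun (st : List String × Option Int) (p : Int × String) =>
        let trimmed := PySem.Str.strip p.2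
        if trimmed == "" then st
        else
          let na := if p.1 == ai then some ((st.1.length : Int)) else st.2
          (st.1 ++ [trimmed], na)) (acc, opt)
    = (acc ++ (cs.filter (fun c => PySem.Str.strip c != "")).map PySem.Str.strip,
       if s ≤ ai ∧ ai < s + cs.length ∧ PySem.Str.strip (cs.getD (ai - s).toNat "") != "" then
         some ((acc.length : Int) + ((cs.take (ai - s).toNat).countP (fun c => PySem.Str.strip c != "") : Int))
       else opt) := by
  induction cs generalizing s acc opt with
  | nil => simp [PySem.List.enumerate]; omega
  | cons c cs ih =>
    rw [PySem.List.enumerate_cons, List.foldl_cons]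
    by_cases hc : (PySem.Str.strip c == "") = true
    · have hc' : (PySem.Str.strip c != "") = false := by simp_all
      simp only [hc, if_pos]
      rw [ih (s + 1) acc opt]
      simp only [Prod.mk.injEq]
      refine ⟨by simp [hc'], ?_⟩
      by_cases hsa : ai = s
      · subst hsa
        rw [if_neg (by intro h; omega),
            if_neg (by
              intro h
              have := h.2.2
              rw [show (ai - ai).toNat = 0 by omega, List.getD_cons_zero] at this
              rw [hc'] at this; exact Bool.false_ne_true this)]
      · by_cases hin : s + 1 ≤ ai ∧ ai < s + 1 + (cs.length : Int)
        · have hk : (ai - s).toNat = (ai - (s + 1)).toNat + 1 := by omega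
          have b1 : s ≤ ai := by omega
          have b2 : ai < s + ((c :: cs).length : Int) := by
            simp only [List.length_cons]; push_cast; omega
          rw [hk, List.getD_cons_succ, List.take_succ_cons]
          simp only [List.countP_cons, hc', Bool.false_eq_true, if_false, add_zero]
          by_cases hp : (PySem.Str.strip (cs.getD (ai - (s + 1)).toNat "") != "") = true
          · rw [if_pos ⟨hin.1, hin.2, hp⟩, if_pos ⟨b1, b2, hp⟩]
          · rw [if_neg (fun h => hp h.2.2), if_neg (fun h => hp h.2.2)]
        · rw [if_neg (fun h => hin ⟨h.1, h.2.1⟩),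
              if_neg (by
                intro h
                have hgt : s < ai := lt_of_le_of_ne h.1 (fun e => hsa e.symm)
                have hb : ai < s + ((c :: cs).length : Int) := h.2.1
                simp only [List.length_cons] at hb; push_cast at hb
                exact hin ⟨by omega, by omega⟩)]
    · have hc' : (PySem.Str.strip c != "") = true := by simp_all
      simp only [if_neg hc]
      rw [ih (s + 1) (acc ++ [PySem.Str.strip c])
          (if (s == ai) = true then some ((acc.length : Int)) else opt)]
      simp only [Prod.mk.injEq]
      refine ⟨by simp [hc'], ?_⟩
      by_cases hsa : ai = s
      · subst hsa
        have e1 : ((ai == ai) = true) := by simp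
        rw [if_pos e1]
        have n1 : ¬ (ai + 1 ≤ ai ∧ ai < ai + 1 + (cs.length : Int) ∧
            (PySem.Str.strip (cs.getD (ai - (ai + 1)).toNat "") != "") = true) := by
          intro h; omega
        have h2 : ai ≤ ai ∧ ai < ai + ((c :: cs).length : Int) ∧
            (PySem.Str.strip ((c :: cs).getD (ai - ai).toNat "") != "") = true := by
          refine ⟨le_refl _, ?_, ?_⟩
          · simp only [List.length_cons]; push_cast; omega
          · rw [show (ai - ai).toNat = 0 by omega, List.getD_cons_zero]; exact hc'
        rw [if_neg n1, if_pos h2, show (ai - ai).toNat = 0 by omega]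
        simp
      · have e0 : ((s == ai) = false) := by
          simp only [beq_eq_false_iff_ne]; exact fun e => hsa e.symm
        rw [e0]
        simp only [Bool.false_eq_true, if_false]
        by_cases hin : s + 1 ≤ ai ∧ ai < s + 1 + (cs.length : Int)
        · have hk : (ai - s).toNat = (ai - (s + 1)).toNat + 1 := by omega
          have b1 : s ≤ ai := by omega
          have b2 : ai < s + ((c :: cs).length : Int) := by
            simp only [List.length_cons]; push_cast; omega
          rw [hk, List.getD_cons_succ, List.take_succ_cons]
          simp only [List.countP_cons, hc', if_true]
          by_cases hp : (PySem.Str.strip (cs.getD (ai - (s + 1)).toNat "") != "") = true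
          · rw [if_pos ⟨hin.1, hin.2, hp⟩, if_pos ⟨b1, b2, hp⟩]
            congr 1
            simp only [List.length_append, List.length_singleton]
            push_cast; ring
          · rw [if_neg (fun h => hp h.2.2), if_neg (fun h => hp h.2.2)]
        · rw [if_neg (fun h => hin ⟨h.1, h.2.1⟩),
              if_neg (by
                intro h
                have hgt : s < ai := lt_of_le_of_ne h.1 (fun e => hsa e.symm)
                have hb : ai < s + ((c :: cs).length : Int) := h.2.1
                simp only [List.length_cons] at hb; push_cast at hb
                exact hin ⟨by omega, by omega⟩)]

-- ===== VERDICT (by name: the statement is the Claim_ definition above) =====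
theorem sanitize_choices_py_spec : Claim_equal_sanitize_choices_py := by
  intro cs ai _
  unfold Spec_sanitize_choices_py sanitize_choices_py sanitize_choices_py_alt
  rw [sanA_loop ai cs 0 [] none]
  simp only [List.nil_append, List.length_nil, Int.sub_zero, Nat.cast_zero, zero_add]
  by_cases h : 0 ≤ ai ∧ ai < (cs.length : Int) ∧ PySem.Str.strip (cs.getD ai.toNat "") != ""
  · rcases h with ⟨h0, h1, h2⟩
    have hget : PySem.List.pyGet? cs ai = some cs[ai.toNat] := by
      rw [PySem.List.pyGet?_of_nonneg cs h0]
      exact List.getElem?_eq_getElem (by omega)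
    have hgd : cs.getD ai.toNat "" = cs[ai.toNat] := List.getD_eq_getElem cs "" (by omega)
    rw [if_pos ⟨h0, h1, h2⟩]
    simp only [hget, hgd] at h2 ⊢
    rw [if_pos (by simp [h0, h1, h2])]
    rw [PySem.List.slice_to cs h0]
  · rw [if_neg h]
    have : ¬ ((decide (0 ≤ ai) && decide (ai < (cs.length : Int))
        && (match PySem.List.pyGet? cs ai with
            | some c => PySem.Str.strip c != ""
            | none => false)) = true) := by
      intro hh
      simp only [Bool.and_eq_true, decide_eq_true_eq] at hh
      rcases hh with ⟨⟨h0, h1⟩, h2⟩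
      have hget : PySem.List.pyGet? cs ai = some cs[ai.toNat] := by
        rw [PySem.List.pyGet?_of_nonneg cs h0]
        exact List.getElem?_eq_getElem (by omega)
      rw [hget] at h2
      exact h ⟨h0, h1, by rw [List.getD_eq_getElem cs "" (by omega)]; exact h2⟩
    rw [if_neg this]
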